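-- pv_equiv track=rewrite | github.com/vasu-313/Python-Programs | Strings/count_char_occurrence.py | charOccurrence
-- ===== SOURCE A (Python) =====
-- def charOccurrence(text):
--     dici = {}
--
--     for char in text:
--         if char not in dici:
--             dici[char] = 1
--         else:
--             dici[char] += 1
--
--     result = ""
--     for key in dici:
--         result += f"{key} = {dici[key]}\n"
--     return result
-- ===== SOURCE B (Python) =====
-- def charOccurrence(text):
--     seen = []
--     result = ""
--     for char in text:
--         if char not in seen:
--             seen.append(char)
--             result += f"{char} = {text.count(char)}\n"
--     return result
-- ===== Notes on version B (the rewrite author's own statement) =====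
-- stated objective: alternative
-- what changed: Drops the frequency dict and its separate formatting pass: one loop over the text emits each character's line at first sight, computing the count by rescanning with str.count and remembering emitted characters in a seen list.
import Mathlib
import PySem

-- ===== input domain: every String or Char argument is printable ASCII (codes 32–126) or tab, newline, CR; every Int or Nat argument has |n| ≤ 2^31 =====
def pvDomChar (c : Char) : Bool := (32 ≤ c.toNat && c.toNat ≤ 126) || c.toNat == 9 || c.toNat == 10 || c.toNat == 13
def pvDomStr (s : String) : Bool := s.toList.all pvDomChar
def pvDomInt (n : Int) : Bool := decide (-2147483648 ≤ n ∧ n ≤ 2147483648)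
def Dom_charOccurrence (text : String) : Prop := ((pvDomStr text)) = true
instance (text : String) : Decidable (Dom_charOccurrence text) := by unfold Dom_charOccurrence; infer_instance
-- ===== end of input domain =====

-- B replaces the dict-then-format two-pass of A by a single first-sight emission loop that
-- recounts each new character with str.count (alternative decomposition, not claimed faster).

-- ===== PORT A =====
def charOccurrence (text : String) : String :=
  let dici : PySem.Dict Char Int := text.toList.foldl
    (fun d char =>
      if d.contains char = false then d.insert char 1
      else d.insert char (d.getD char 0 + 1))
    PySem.Dict.empty
  dici.keys.foldl
    (fun result key =>
      result ++ String.ofList [key] ++ " = " ++ PySem.Int.toStr (dici.getD key 0) ++ "\n")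
    ""

-- ===== PORT B =====
def charOccurrence_alt (text : String) : String :=
  (text.toList.foldl
    (fun (p : List Char × String) char =>
      if char ∈ p.1 then p
      else (p.1 ++ [char],
            p.2 ++ String.ofList [char] ++ " = "
                ++ PySem.Int.toStr ((PySem.Str.count text (String.ofList [char]) : Nat) : Int) ++ "\n"))
    ([], "")).2

-- ===== PRECONDITION & SPEC =====
def Spec_charOccurrence (text : String) (out : String) : Prop := out = charOccurrence_alt text
instance (text : String) (out : String) : Decidable (Spec_charOccurrence text out) := by unfold Spec_charOccurrence; infer_instance

-- ===== CLAIM (what is proved, stated in full; the proofs are below) =====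
def Claim_equal_charOccurrence : Prop := ∀ (text : String), Dom_charOccurrence text → Spec_charOccurrence text (charOccurrence text)

-- ===== LEMMAS AND PROOFS =====

-- str.count with a single-character needle is the list count
theorem countGo_singleton (c : Char) (l : List Char) : ∀ (fuel acc : Nat),
    l.length ≤ fuel → PySem.Chars.count.go [c] fuel l acc = acc + l.count c := by
  induction l with
  | nil =>
    intro fuel acc _
    cases fuel <;> simp [PySem.Chars.count.go.eq_def]
  | cons h t ih =>
    intro fuel acc hf
    cases fuel with
    | zero => simp at hf
    | succ fuel =>
      rw [PySem.Chars.count.go.eq_def]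
      dsimp only
      have hpre : (([c] : List Char).isPrefixOf (h :: t)) = (c == h) := by
        cases t <;> simp [List.isPrefixOf]
      rw [hpre]
      by_cases hc : c = h
      · subst hc
        rw [if_pos (by simp)]
        simp only [List.length_cons, List.length_nil, Nat.zero_add, List.drop_succ_cons,
          List.drop_zero]
        rw [ih fuel (acc + 1) (by simp at hf; omega)]
        simp
        omega
      · rw [if_neg (by simp [hc])]
        rw [ih fuel acc (by simp at hf; omega)]
        simp [Ne.symm hc]

theorem count_singleton (cs : List Char) (c : Char) :
    PySem.Chars.count cs [c] = cs.count c := by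
  have h0 : ([c] : List Char).isEmpty = false := rfl
  simp only [PySem.Chars.count, h0, Bool.false_eq_true, if_false]
  rw [countGo_singleton c cs cs.length 0 le_rfl]
  omega

-- A's counting loop builds exactly the Counter dict
theorem dictA_eq_counter (l : List Char) :
    l.foldl (fun (d : PySem.Dict Char Int) char =>
      if d.contains char = false then d.insert char 1
      else d.insert char (d.getD char 0 + 1)) PySem.Dict.empty
    = PySem.Dict.counter l := by
  rw [← PySem.Dict.foldl_insert_getD_add_one_eq_counter]
  congr 1
  funext d char
  by_cases h : d.contains char = false
  · rw [if_pos h, PySem.Dict.getD_of_not_contains d 0 h]; norm_num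
  · rw [if_neg h]

-- invariant of B's single pass: it appends the formatted lines of the not-yet-seen dedup
theorem foldB_snd (f1 f2 : Char → String) (l : List Char) : ∀ (s : List Char) (r : String),
    (l.foldl (fun (p : List Char × String) char =>
        if char ∈ p.1 then p
        else (p.1 ++ [char], p.2 ++ f1 char ++ " = " ++ f2 char ++ "\n")) (s, r)).2
    = ((PySem.Set.ofList l).filter (fun ch => decide (ch ∉ s))).foldl
        (fun result key => result ++ f1 key ++ " = " ++ f2 key ++ "\n") r := by
  induction l with
  | nil => intro s r; simp [PySem.Set.ofList]
  | cons c t ih =>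
    intro s r
    rw [PySem.Set.ofList_cons]
    simp only [List.foldl_cons, PySem.Set.discard, List.filter_cons, List.filter_filter]
    by_cases hc : c ∈ s
    · rw [if_pos hc, if_neg (by simp [hc]), ih s r]
      congr 1
      apply List.filter_congr
      intro y _
      by_cases hy : y = c
      · subst hy; simp [hc]
      · simp [hy]
    · rw [if_neg hc, if_pos (by simp [hc]), ih (s ++ [c]) _]
      simp only [List.foldl_cons]
      congr 1
      apply List.filter_congr
      intro y _
      by_cases hy : y = c
      · subst hy; simp
      · simp [hy]

-- ===== VERDICT (by name: the statement is the Claim_ definition above) =====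
theorem charOccurrence_spec : Claim_equal_charOccurrence := by
  intro text _
  show charOccurrence text = charOccurrence_alt text
  unfold charOccurrence charOccurrence_alt
  rw [foldB_snd]
  simp only [dictA_eq_counter, PySem.Dict.keys_counter, PySem.Dict.getD_counter,
    List.not_mem_nil, not_false_iff, decide_true, List.filter_true,
    PySem.Str.count_eq, String.toList_ofList, count_singleton]
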